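-- pv_equiv track=rewrite | github.com/yuwei29/programs | PythonCode/plain/test26.py | f
-- ===== SOURCE A (Python) =====
-- def f(a,k):
--     l=len(a)
--     res=[]
--     if l==0 or k==0 or l<k:
--         return [0]
--     for i in range(l-k+1):
--         pre=a[i]
--         res+=[pre+e for e in f(a[i+1:],k-1)]
--     return res
-- ===== SOURCE B (Python) =====
-- def f(a, k):
--     l = len(a)
--     if l == 0 or k == 0 or l < k:
--         return [0]
--     inc = [a[0] + e for e in f(a[1:], k - 1)]
--     exc = f(a[1:], k) if l - 1 >= k else []
--     return inc + exc
-- ===== Notes on version B (the rewrite author's own statement) =====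
-- stated objective: alternative
-- what changed: Replaced A's index loop over all starting positions (with a slice and an inner recursive call per position) by a pick-or-skip binary recursion on the head element (include a[0] via f(a[1:],k-1); exclude it via f(a[1:],k) only when l-1>=k), keeping the same top-level sentinel guard; Pre_ excludes k<0 with nonempty a, where A raises IndexError.
import Mathlib
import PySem

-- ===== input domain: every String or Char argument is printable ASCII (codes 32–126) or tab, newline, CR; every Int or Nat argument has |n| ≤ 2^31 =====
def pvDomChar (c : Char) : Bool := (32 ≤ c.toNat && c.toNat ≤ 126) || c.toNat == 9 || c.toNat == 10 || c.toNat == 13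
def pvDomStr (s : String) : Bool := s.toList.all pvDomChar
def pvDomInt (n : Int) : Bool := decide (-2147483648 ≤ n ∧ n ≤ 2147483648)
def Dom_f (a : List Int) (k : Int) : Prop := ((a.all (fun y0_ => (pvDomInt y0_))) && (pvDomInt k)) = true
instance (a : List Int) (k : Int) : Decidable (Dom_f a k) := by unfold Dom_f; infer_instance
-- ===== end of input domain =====

-- B replaces A's index loop over starting positions by a pick-or-skip recursion on the head; same values in the same order wherever A returns.

-- ===== PORT A =====
def f (a : List Int) (k : Int) : List Int :=
  let l : Int := a.length
  if l = 0 ∨ k = 0 ∨ l < k then [0]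
  else
    (PySem.List.pyRange 0 (l - k + 1) 1).attach.foldl
      (fun res i =>
        let pre := PySem.List.pyGetD a i.1 0
        res ++ (f (PySem.List.slice a (some (i.1 + 1)) none) (k - 1)).map (fun e => pre + e))
      []
termination_by a.length
decreasing_by
  rename_i hguard
  have h0 : 0 ≤ i.1 := (PySem.List.mem_pyRange_one.mp i.2).1
  have hlen : a.length ≠ 0 := by
    intro h; exact hguard (Or.inl (by show ((a.length : Int)) = 0; exact_mod_cast h))
  rw [PySem.List.slice_from a (by omega : (0:Int) ≤ ↑i + 1)]
  simp only [List.length_drop]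
  omega

-- ===== PORT B =====
def f_alt (a : List Int) (k : Int) : List Int :=
  let l : Int := a.length
  if l = 0 ∨ k = 0 ∨ l < k then [0]
  else
    let inc := (f_alt (PySem.List.slice a (some 1) none) (k - 1)).map
      (fun e => PySem.List.pyGetD a 0 0 + e)
    let exc := if l - 1 ≥ k then f_alt (PySem.List.slice a (some 1) none) k else []
    inc ++ exc
termination_by a.length
decreasing_by
  · rename_i hguard
    have hlen : a.length ≠ 0 := by
      intro h; exact hguard (Or.inl (by show ((a.length : Int)) = 0; exact_mod_cast h))
    rw [PySem.List.slice_from_one]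
    simp only [List.length_tail]
    omega
  · rename_i hguard _
    have hlen : a.length ≠ 0 := by
      intro h; exact hguard (Or.inl (by show ((a.length : Int)) = 0; exact_mod_cast h))
    rw [PySem.List.slice_from_one]
    simp only [List.length_tail]
    omega

-- ===== PRECONDITION & SPEC =====
-- Pre_ excludes exactly the inputs (k < 0 with nonempty a) on which the Python A raises IndexError.
def Pre_f (a : List Int) (k : Int) : Prop := 0 ≤ k ∨ a = []
instance (a : List Int) (k : Int) : Decidable (Pre_f a k) := by unfold Pre_f; infer_instance
def pvWitness_f : List Int × Int := ([1, 2, 3], 2)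

def Spec_f (a : List Int) (k : Int) (out : List Int) : Prop := out = f_alt a k
instance (a : List Int) (k : Int) (out : List Int) : Decidable (Spec_f a k out) := by unfold Spec_f; infer_instance

-- ===== CLAIM (what is proved, stated in full; the proofs are below) =====
def Claim_equal_f : Prop := ∀ (a : List Int) (k : Int), Dom_f a k → Pre_f a k → Spec_f a k (f a k)

-- ===== LEMMAS AND PROOFS =====

-- f on a non-degenerate cons splits into the head term plus the loop over the tail.
theorem f_cons_step (x : Int) (t : List Int) (k : Int) (hk : 1 ≤ k)
    (hlk : (k:Int) ≤ (x :: t).length) :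
    f (x :: t) k =
      ((f t (k - 1)).map (fun e => x + e)) ++
        (if ((x :: t).length : Int) - 1 ≥ k then f t k else []) := by
  have hg : ¬((((x :: t).length : Int)) = 0 ∨ k = 0 ∨ (((x :: t).length : Int)) < k) := by
    simp only [List.length_cons] at hlk ⊢; omega
  rw [f]
  simp only [if_neg hg]
  rw [List.foldl_attach (f := fun res i =>
        res ++ (f (PySem.List.slice (x :: t) (some (i + 1))) (k - 1)).map
          (fun e => PySem.List.pyGetD (x :: t) i 0 + e))]
  rw [PySem.List.foldl_append_eq_flatMap]
  rw [PySem.List.pyRange_one_cons (by simp only [List.length_cons] at hlk ⊢; omega : (0:Int) < ↑(x :: t).length - k + 1)]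
  simp only [List.flatMap_cons, List.nil_append, zero_add, PySem.List.slice_from_one,
    List.tail_cons, PySem.List.pyGetD_zero_cons]
  congr 1
  by_cases hc : ((x :: t).length : Int) - 1 ≥ k
  · rw [if_pos hc]
    have hgt : ¬(((t.length : Int)) = 0 ∨ k = 0 ∨ ((t.length : Int)) < k) := by
      simp only [List.length_cons] at hlk hc ⊢; omega
    conv_rhs => rw [f]
    simp only [if_neg hgt]
    rw [List.foldl_attach (f := fun res i =>
          res ++ (f (PySem.List.slice t (some (i + 1))) (k - 1)).map
            (fun e => PySem.List.pyGetD t i 0 + e))]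
    rw [PySem.List.foldl_append_eq_flatMap]
    simp only [List.nil_append]
    rw [PySem.List.pyRange_one, PySem.List.pyRange_one]
    rw [List.flatMap_map, List.flatMap_map]
    have hlen2 : ((((x :: t).length : Int) - k + 1 - 1)).toNat = (((t.length : Int) - k + 1 - 0)).toNat := by
      simp only [List.length_cons]; push_cast; omega
    rw [hlen2]
    congr 1
    funext m
    have e1 : PySem.List.pyGetD (x :: t) (1 + (m : Int)) 0 = PySem.List.pyGetD t ((0:Int) + (m : Int)) 0 := by
      have h1 : (1 + (m : Int)) = (((m + 1 : Nat)) : Int) := by omega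
      have h2 : ((0:Int) + (m : Int)) = ((m : Nat) : Int) := by omega
      rw [h1, h2, PySem.List.pyGetD_natCast, PySem.List.pyGetD_natCast, List.getD_cons_succ]
    have e2 : PySem.List.slice (x :: t) (some (1 + (m : Int) + 1)) = PySem.List.slice t (some ((0:Int) + (m : Int) + 1)) := by
      rw [PySem.List.slice_from _ (by omega), PySem.List.slice_from _ (by omega)]
      have h3 : (1 + (m : Int) + 1).toNat = ((0:Int) + (m : Int) + 1).toNat + 1 := by omega
      rw [h3, List.drop_succ_cons]
    simp only [e1, e2]
  · rw [if_neg hc]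
    rw [PySem.List.pyRange_one_eq_nil (by simp only [List.length_cons] at hlk hc ⊢; omega)]
    simp

theorem f_eq_f_alt (a : List Int) (k : Int) (hk : 0 ≤ k) : f a k = f_alt a k := by
  induction a generalizing k with
  | nil =>
    rw [f, f_alt]; simp
  | cons x t ih =>
    by_cases hg : ((((x :: t).length : Int) = 0) ∨ k = 0 ∨ (((x :: t).length : Int) < k))
    · rw [f, f_alt]
      simp only [if_pos hg]
    · have hk0 : k ≠ 0 := fun h => hg (Or.inr (Or.inl h))
      have hlk : ¬(((x :: t).length : Int) < k) := fun h => hg (Or.inr (Or.inr h))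
      have hk1 : 1 ≤ k := by omega
      rw [f_cons_step x t k hk1 (by omega)]
      conv_rhs => rw [f_alt]
      simp only [PySem.List.slice_from_one, List.tail_cons, PySem.List.pyGetD_zero_cons,
        if_neg hg]
      rw [ih (k - 1) (by omega), ih k hk]

-- ===== VERDICT (by name: the statement is the Claim_ definition above) =====
theorem f_spec : Claim_equal_f := by
  intro a k _ hpre
  unfold Spec_f
  rcases hpre with hk | rfl
  · exact f_eq_f_alt a k hk
  · rw [f, f_alt]; simp
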